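-- pv_equiv track=rewrite | github.com/mlacosta/Algorithmic-Challenges | course_03/problem_02/clusteringBig.py | create_hamming_mask
-- ===== SOURCE A (Python) =====
-- def create_hamming_mask(size):
--     #1-bit mask
--     dist1 = [1 << i for i in range(size)]
--     #2-bits mask
--     dist2 = set()
--
--     for value1 in dist1:
--         for value2 in dist1:
--             if value1 != value2:
--                 dist2.add(value1 | value2)
--
--     dist2 = sorted(list(dist2))
--
--     return [0] + dist1 + dist2
-- ===== SOURCE B (Python) =====
-- def create_hamming_mask(size):
--     out = [0]
--     for i in range(size):
--         out.append(1 << i)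
--     for j in range(size):
--         for i in range(j):
--             out.append((1 << i) | (1 << j))
--     return out
-- ===== Notes on version B (the rewrite author's own statement) =====
-- stated objective: faster
-- what changed: Instead of building a set from all ordered pairs and then sorting it, B appends the two-bit masks directly in increasing order via a nested i<j loop, eliminating the set and the sort; intended as faster, and a timing run measured B well ahead at the largest size both finish.
import Mathlib
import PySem

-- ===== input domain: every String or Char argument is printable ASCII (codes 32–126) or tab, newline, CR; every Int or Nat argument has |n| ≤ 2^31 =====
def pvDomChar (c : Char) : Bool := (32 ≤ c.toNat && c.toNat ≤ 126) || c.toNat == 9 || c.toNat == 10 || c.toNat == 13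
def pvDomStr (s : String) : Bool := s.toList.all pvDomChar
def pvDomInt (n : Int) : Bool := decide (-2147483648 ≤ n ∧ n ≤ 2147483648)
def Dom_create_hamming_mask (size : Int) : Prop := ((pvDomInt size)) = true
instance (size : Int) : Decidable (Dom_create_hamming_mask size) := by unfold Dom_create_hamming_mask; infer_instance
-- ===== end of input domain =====

-- B replaces A's "set of all ordered pairs, then sort" by emitting the two-bit masks
-- directly in increasing order with a nested i<j loop, so no set and no sort are needed
-- (intended as faster; a timing run measured B well ahead at the largest common size).

-- ===== PORT A =====
-- literal port of A: 1 << i is (1 : Int) <<< i.toNat (i ∈ range(size) is nonnegative, so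
-- .toNat is exact); value1 | value2 is PySem.Int.bor; set → PySem.Set; sorted → PySem.List.sorted
def create_hamming_mask (size : Int) : List Int :=
  let dist1 : List Int := (PySem.List.pyRange 0 size 1).map (fun i => (1 : Int) <<< i.toNat)
  let dist2 : PySem.Set Int :=
    dist1.foldl (fun d2 value1 =>
      dist1.foldl (fun d2 value2 =>
        if value1 ≠ value2 then PySem.Set.add d2 (PySem.Int.bor value1 value2) else d2) d2)
      PySem.Set.empty
  let dist2s := PySem.List.sorted dist2 (fun x => x) false
  [0] ++ dist1 ++ dist2s

-- ===== PORT B =====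
-- literal port of Source B: one append loop for the 1-bit masks, a nested i<j append loop
-- for the 2-bit masks
def create_hamming_mask_alt (size : Int) : List Int :=
  let out1 := (PySem.List.pyRange 0 size 1).foldl
    (fun out i => out ++ [(1 : Int) <<< i.toNat]) [0]
  (PySem.List.pyRange 0 size 1).foldl (fun out j =>
    (PySem.List.pyRange 0 j 1).foldl (fun out i =>
      out ++ [PySem.Int.bor ((1 : Int) <<< i.toNat) ((1 : Int) <<< j.toNat)]) out) out1

-- ===== PRECONDITION & SPEC =====
def Spec_create_hamming_mask (size : Int) (out : List Int) : Prop := out = create_hamming_mask_alt size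
instance (size : Int) (out : List Int) : Decidable (Spec_create_hamming_mask size out) := by unfold Spec_create_hamming_mask; infer_instance

-- ===== CLAIM (what is proved, stated in full; the proofs are below) =====
def Claim_equal_create_hamming_mask : Prop := ∀ (size : Int), Dom_create_hamming_mask size → Spec_create_hamming_mask size (create_hamming_mask size)

-- ===== LEMMAS AND PROOFS =====

-- the 1-bit mask 1 << k, as a function of the Nat index
def pvP (k : Nat) : Int := (1 : Int) <<< k

-- B's 2-bit mask list for size n, written over Nat ranges
def pvL (n : Nat) : List Int :=
  (List.range n).flatMap (fun j => (List.range j).map (fun i => PySem.Int.bor (pvP i) (pvP j)))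

theorem pvP_eq (k : Nat) : pvP k = ((2 ^ k : Nat) : Int) := by
  simp [pvP, Int.shiftLeft_eq]

theorem pvP_inj {a b : Nat} (h : pvP a = pvP b) : a = b := by
  rw [pvP_eq, pvP_eq] at h
  exact Nat.pow_right_injective (le_refl 2) (by exact_mod_cast h)

theorem pv_pow_lor (i j : Nat) (h : i < j) : 2 ^ i ||| 2 ^ j = 2 ^ i + 2 ^ j := by
  induction i generalizing j with
  | zero =>
    obtain ⟨j', rfl⟩ : ∃ j', j = j' + 1 := ⟨j - 1, by omega⟩
    have h2 : (2 ^ (j' + 1) : Nat) = Nat.bit false (2 ^ j') := by simp [Nat.bit, pow_succ]; ring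
    rw [pow_zero, h2, show (1 : Nat) = Nat.bit true 0 from rfl, Nat.lor_bit]
    simp [Nat.bit]; omega
  | succ i ih =>
    obtain ⟨j', rfl⟩ : ∃ j', j = j' + 1 := ⟨j - 1, by omega⟩
    have h1 : (2 ^ (i + 1) : Nat) = Nat.bit false (2 ^ i) := by simp [Nat.bit, pow_succ]; ring
    have h2 : (2 ^ (j' + 1) : Nat) = Nat.bit false (2 ^ j') := by simp [Nat.bit, pow_succ]; ring
    rw [h1, h2, Nat.lor_bit, ih j' (by omega)]
    simp [Nat.bit]; ring

theorem pvBor_eq (i j : Nat) (h : i < j) :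
    PySem.Int.bor (pvP i) (pvP j) = ((2 ^ i + 2 ^ j : Nat) : Int) := by
  rw [pvP_eq, pvP_eq, PySem.Int.bor_natCast, pv_pow_lor i j h]

theorem pvBor_comm (a b : Int) : PySem.Int.bor a b = PySem.Int.bor b a := PySem.Int.bor_comm a b

-- membership in the inner loop's fold
theorem pv_mem_inner (xs : List Int) (s : PySem.Set Int) (v1 y : Int) :
    y ∈ xs.foldl (fun d2 value2 =>
        if v1 ≠ value2 then PySem.Set.add d2 (PySem.Int.bor v1 value2) else d2) s ↔
      y ∈ s ∨ ∃ b ∈ xs, v1 ≠ b ∧ y = PySem.Int.bor v1 b := by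
  induction xs generalizing s with
  | nil => simp
  | cons x xs ih =>
    simp only [List.foldl_cons, ih, List.mem_cons]
    split_ifs with h
    · rw [PySem.Set.mem_add]
      constructor
      · rintro (⟨hy | hy⟩ | ⟨b, hb, hvb, hy⟩)
        · exact Or.inl hy
        · exact Or.inr ⟨x, Or.inl rfl, h, hy⟩
        · exact Or.inr ⟨b, Or.inr hb, hvb, hy⟩
      · rintro (hy | ⟨b, (rfl | hb), hvb, hy⟩)
        · exact Or.inl (Or.inl hy)
        · exact Or.inl (Or.inr hy)
        · exact Or.inr ⟨b, hb, hvb, hy⟩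
    · rw [not_ne_iff] at h
      subst h
      constructor
      · rintro (hy | ⟨b, hb, hvb, hy⟩)
        · exact Or.inl hy
        · exact Or.inr ⟨b, Or.inr hb, hvb, hy⟩
      · rintro (hy | ⟨b, (rfl | hb), hvb, hy⟩)
        · exact Or.inl hy
        · exact absurd rfl hvb
        · exact Or.inr ⟨b, hb, hvb, hy⟩

theorem pv_nodup_inner (xs : List Int) (s : PySem.Set Int) (v1 : Int) (hs : s.Nodup) :
    (xs.foldl (fun d2 value2 =>
        if v1 ≠ value2 then PySem.Set.add d2 (PySem.Int.bor v1 value2) else d2) s).Nodup := by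
  induction xs generalizing s with
  | nil => exact hs
  | cons x xs ih =>
    simp only [List.foldl_cons]
    split_ifs with h
    · exact ih _ (PySem.Set.nodup_add s _ hs)
    · exact ih _ hs

-- membership in the outer loop's fold
theorem pv_mem_outer (ys xs : List Int) (s : PySem.Set Int) (y : Int) :
    y ∈ ys.foldl (fun d2 value1 =>
        xs.foldl (fun d2 value2 =>
          if value1 ≠ value2 then PySem.Set.add d2 (PySem.Int.bor value1 value2) else d2) d2) s ↔
      y ∈ s ∨ ∃ a ∈ ys, ∃ b ∈ xs, a ≠ b ∧ y = PySem.Int.bor a b := by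
  induction ys generalizing s with
  | nil => simp
  | cons v ys ih =>
    simp only [List.foldl_cons, ih, pv_mem_inner, List.mem_cons]
    constructor
    · rintro (⟨hy | ⟨b, hb, hvb, hy⟩⟩ | ⟨a, ha, b, hb, hab, hy⟩)
      · exact Or.inl hy
      · exact Or.inr ⟨v, Or.inl rfl, b, hb, hvb, hy⟩
      · exact Or.inr ⟨a, Or.inr ha, b, hb, hab, hy⟩
    · rintro (hy | ⟨a, (rfl | ha), b, hb, hab, hy⟩)
      · exact Or.inl (Or.inl hy)
      · exact Or.inl (Or.inr ⟨b, hb, hab, hy⟩)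
      · exact Or.inr ⟨a, ha, b, hb, hab, hy⟩

theorem pv_nodup_outer (ys xs : List Int) (s : PySem.Set Int) (hs : s.Nodup) :
    (ys.foldl (fun d2 value1 =>
        xs.foldl (fun d2 value2 =>
          if value1 ≠ value2 then PySem.Set.add d2 (PySem.Int.bor value1 value2) else d2) d2) s).Nodup := by
  induction ys generalizing s with
  | nil => exact hs
  | cons v ys ih => exact ih _ (pv_nodup_inner _ _ _ hs)

-- dist1 over a Nat-sized range
theorem pv_dist1_eq (size : Int) :
    (PySem.List.pyRange 0 size 1).map (fun i => (1 : Int) <<< i.toNat) =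
      (List.range size.toNat).map pvP := by
  rw [PySem.List.pyRange_one]
  simp only [List.map_map, Function.comp_def, zero_add, Int.toNat_natCast, Int.sub_zero,
    Int.shiftLeft_natCast_right]
  rfl

-- strict ordering of the two-bit values under the (j, i) lexicographic order
theorem pv_val_lt {i j i' j' : Nat} (hij : i < j) (hij' : i' < j')
    (h : j < j' ∨ (j = j' ∧ i < i')) : (2 ^ i + 2 ^ j : Nat) < 2 ^ i' + 2 ^ j' := by
  rcases h with h | ⟨rfl, h⟩
  · have h1 : (2 ^ i : Nat) < 2 ^ j := Nat.pow_lt_pow_right (by norm_num) hij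
    have h2 : (2 ^ j : Nat) + 2 ^ j ≤ 2 ^ j' := by
      calc (2 ^ j : Nat) + 2 ^ j = 2 ^ (j + 1) := by ring
      _ ≤ 2 ^ j' := Nat.pow_le_pow_right (by norm_num) h
    have h3 : (0 : Nat) < 2 ^ i' := Nat.two_pow_pos i'
    omega
  · have h1 : (2 ^ i : Nat) < 2 ^ i' := Nat.pow_lt_pow_right (by norm_num) h
    omega

theorem pv_mem_pvL (n : Nat) (y : Int) :
    y ∈ pvL n ↔ ∃ j, j < n ∧ ∃ i, i < j ∧ y = PySem.Int.bor (pvP i) (pvP j) := by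
  simp [pvL, List.mem_flatMap, List.mem_range, List.mem_map, eq_comm]

theorem pv_pvL_pairwise (n : Nat) : (pvL n).Pairwise (· < ·) := by
  induction n with
  | zero => simp [pvL]
  | succ n ih =>
    have hstep : pvL (n + 1) = pvL n ++ (List.range n).map (fun i => PySem.Int.bor (pvP i) (pvP n)) := by
      simp [pvL, List.range_succ]
    rw [hstep, List.pairwise_append]
    refine ⟨ih, ?_, ?_⟩
    · -- the new block is strictly increasing in i
      refine List.pairwise_map.mpr (List.pairwise_iff_getElem.mpr ?_)
      intro p q hp hq hpq
      simp only [List.length_range] at hp hq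
      simp only [List.getElem_range]
      rw [pvBor_eq p n hp, pvBor_eq q n hq]
      exact_mod_cast pv_val_lt hp hq (Or.inr ⟨rfl, hpq⟩)
    · -- everything already emitted is smaller than every new element
      intro x hx y hy
      rw [pv_mem_pvL] at hx
      obtain ⟨j, hj, i, hij, rfl⟩ := hx
      simp only [List.mem_map, List.mem_range] at hy
      obtain ⟨i', hi', rfl⟩ := hy
      rw [pvBor_eq i j hij, pvBor_eq i' n hi']
      exact_mod_cast pv_val_lt hij hi' (Or.inl hj)

theorem pv_pvL_nodup (n : Nat) : (pvL n).Nodup :=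
  (pv_pvL_pairwise n).imp (fun h => ne_of_lt h)

-- membership in range-mapped pvP
theorem pv_mem_dist1 (n : Nat) (x : Int) :
    x ∈ (List.range n).map pvP ↔ ∃ k, k < n ∧ x = pvP k := by
  simp [List.mem_map, List.mem_range, eq_comm]

-- sorted set of A equals B's direct list
theorem pv_sorted_eq (n : Nat) :
    PySem.List.sorted
      (((List.range n).map pvP).foldl (fun d2 value1 =>
        ((List.range n).map pvP).foldl (fun d2 value2 =>
          if value1 ≠ value2 then PySem.Set.add d2 (PySem.Int.bor value1 value2) else d2) d2)
        PySem.Set.empty) (fun x => x) false = pvL n := by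
  apply PySem.List.sorted_eq_of_perm_of_pairwise_lt
  · -- pvL n is a permutation of the set's elements
    apply (List.perm_ext_iff_of_nodup (pv_pvL_nodup n) (pv_nodup_outer _ _ _ (by simp [PySem.Set.empty]))).2
    intro y
    rw [pv_mem_pvL, pv_mem_outer]
    constructor
    · rintro ⟨j, hj, i, hij, rfl⟩
      refine Or.inr ⟨pvP i, ?_, pvP j, ?_, ?_, rfl⟩
      · exact (pv_mem_dist1 n _).2 ⟨i, by omega, rfl⟩
      · exact (pv_mem_dist1 n _).2 ⟨j, hj, rfl⟩
      · intro h; exact absurd (pvP_inj h) (by omega)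
    · rintro (hy | ⟨a, ha, b, hb, hab, rfl⟩)
      · simp [PySem.Set.empty] at hy
      · obtain ⟨ka, hka, rfl⟩ := (pv_mem_dist1 n _).1 ha
        obtain ⟨kb, hkb, rfl⟩ := (pv_mem_dist1 n _).1 hb
        have hne : ka ≠ kb := fun h => hab (by rw [h])
        rcases Nat.lt_or_ge ka kb with h | h
        · exact ⟨kb, hkb, ka, h, rfl⟩
        · exact ⟨ka, hka, kb, by omega, by rw [pvBor_comm]⟩
  · exact (pv_pvL_pairwise n).imp (fun h => h)

-- B's folds flattened into [0] ++ dist1 ++ pvL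
theorem pv_alt_eq (size : Int) :
    create_hamming_mask_alt size = [0] ++ (List.range size.toNat).map pvP ++ pvL size.toNat := by
  unfold create_hamming_mask_alt
  rw [show ((PySem.List.pyRange 0 size 1).foldl
      (fun out i => out ++ [(1 : Int) <<< i.toNat]) [0]) = [0] ++ (List.range size.toNat).map pvP by
    rw [PySem.List.foldl_append_singleton_eq_map, pv_dist1_eq]]
  simp only [PySem.List.foldl_append_singleton_eq_map]
  rw [PySem.List.foldl_append_eq_flatMap]
  congr 1
  unfold pvL
  simp only [PySem.List.pyRange_one, List.flatMap_map, List.map_map, Function.comp_def,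
    zero_add, Int.toNat_natCast, Int.sub_zero, Int.shiftLeft_natCast_right, pvP]

-- ===== VERDICT (by name: the statement is the Claim_ definition above) =====
theorem create_hamming_mask_spec : Claim_equal_create_hamming_mask := by
  intro size _
  unfold Spec_create_hamming_mask
  rw [pv_alt_eq]
  show ([0] ++ _ ++ _ : List Int) = _
  rw [pv_dist1_eq, pv_sorted_eq]
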